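-- pv_equiv track=rewrite | github.com/2zm00/Algorithm | 25870 Parity of Strings.py | check_string_parity
-- ===== SOURCE A (Python) =====
-- def check_string_parity(s):
--     # 각 문자의 등장 횟수를 저장하는 딕셔너리
--     char_counts = {}
--     for char in s:
--         char_counts[char] = char_counts.get(char, 0) + 1
--
--     # 모든 문자가 짝수 번 등장하는지 확인
--     if all(count % 2 == 0 for count in char_counts.values()):
--         return 0
--
--     # 모든 문자가 홀수 번 등장하는지 확인
--     if all(count % 2 == 1 for count in char_counts.values()):
--         return 1
--
--     # 위 조건에 해당하지 않는 경우
--     return 2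
-- ===== SOURCE B (Python) =====
-- def check_string_parity(s):
--     distinct = set()
--     odd = set()
--     for char in s:
--         distinct.add(char)
--         if char in odd:
--             odd.remove(char)
--         else:
--             odd.add(char)
--     if not odd:
--         return 0
--     return 1 if len(odd) == len(distinct) else 2
-- ===== Notes on version B (the rewrite author's own statement) =====
-- stated objective: alternative
-- what changed: Replaces the frequency dictionary plus two full passes over its values with a single pass maintaining only two sets (all distinct chars, and chars seen an odd number of times via toggling), classifying by emptiness and length comparison of the sets.
import Mathlib
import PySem

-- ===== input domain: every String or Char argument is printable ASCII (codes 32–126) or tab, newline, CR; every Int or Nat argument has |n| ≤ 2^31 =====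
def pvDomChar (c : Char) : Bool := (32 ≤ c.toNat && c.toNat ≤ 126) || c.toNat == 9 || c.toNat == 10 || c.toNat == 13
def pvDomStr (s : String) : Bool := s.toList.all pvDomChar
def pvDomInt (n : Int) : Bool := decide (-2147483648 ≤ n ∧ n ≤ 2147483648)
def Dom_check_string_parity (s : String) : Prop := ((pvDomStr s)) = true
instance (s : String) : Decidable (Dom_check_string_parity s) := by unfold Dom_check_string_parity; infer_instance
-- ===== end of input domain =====

-- B replaces A's frequency dictionary and its two value passes with one pass over the string
-- maintaining two sets (distinct chars, odd-count chars via toggling); alternative decomposition, same cost.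

-- ===== PORT A =====
def check_string_parity (s : String) : Int :=
  -- char_counts = {}; for char in s: char_counts[char] = char_counts.get(char, 0) + 1
  let char_counts : PySem.Dict Char Int :=
    s.toList.foldl (fun d char => d.insert char (d.getD char 0 + 1)) PySem.Dict.empty
  if char_counts.values.all (fun count => PySem.Int.mod count 2 == 0) then 0
  else if char_counts.values.all (fun count => PySem.Int.mod count 2 == 1) then 1
  else 2

-- ===== PORT B =====
-- the loop body's toggle of the `odd` set ("if char in odd: odd.remove(char) else: odd.add(char)")
def pvToggle (odd : PySem.Set Char) (char : Char) : PySem.Set Char :=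
  if PySem.Set.contains odd char then PySem.Set.discard odd char else PySem.Set.add odd char

def check_string_parity_alt (s : String) : Int :=
  let p : PySem.Set Char × PySem.Set Char :=
    s.toList.foldl (fun p char => (PySem.Set.add p.1 char, pvToggle p.2 char))
      (PySem.Set.empty, PySem.Set.empty)
  if p.2.isEmpty then 0
  else if PySem.Set.len p.2 == PySem.Set.len p.1 then 1 else 2

-- ===== PRECONDITION & SPEC =====
def Spec_check_string_parity (s : String) (out : Int) : Prop := out = check_string_parity_alt s
instance (s : String) (out : Int) : Decidable (Spec_check_string_parity s out) := by unfold Spec_check_string_parity; infer_instance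

-- ===== CLAIM (what is proved, stated in full; the proofs are below) =====
def Claim_equal_check_string_parity : Prop := ∀ (s : String), Dom_check_string_parity s → Spec_check_string_parity s (check_string_parity s)

-- ===== LEMMAS AND PROOFS =====

theorem pvContains_iff (o : PySem.Set Char) (x : Char) :
    PySem.Set.contains o x = true ↔ x ∈ o :=
  List.contains_iff_mem

theorem mem_pvToggle (o : PySem.Set Char) (x y : Char) :
    y ∈ pvToggle o x ↔ (if y = x then x ∉ o else y ∈ o) := by
  unfold pvToggle
  by_cases hx : x ∈ o
  · rw [if_pos ((pvContains_iff o x).mpr hx)]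
    show y ∈ List.filter _ o ↔ _
    rw [List.mem_filter]
    by_cases h : y = x
    · subst h; simp [hx]
    · simp [h]
  · rw [if_neg (fun hc => hx ((pvContains_iff o x).mp hc))]
    rw [PySem.Set.mem_add]
    by_cases h : y = x
    · subst h; simp [hx]
    · simp [h]

theorem nodup_pvToggle (o : PySem.Set Char) (x : Char) (h : o.Nodup) :
    (pvToggle o x).Nodup := by
  unfold pvToggle
  by_cases hx : x ∈ o
  · rw [if_pos ((pvContains_iff o x).mpr hx)]
    exact h.filter _
  · rw [if_neg (fun hc => hx ((pvContains_iff o x).mp hc))]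
    unfold PySem.Set.add
    rw [if_neg (fun hc => hx ((pvContains_iff o x).mp hc))]
    simp [List.nodup_append, h]
    exact fun a ha hax => hx (hax ▸ ha)

theorem mem_foldl_pvToggle (cs : List Char) : ∀ (o : PySem.Set Char) (y : Char),
    y ∈ cs.foldl pvToggle o ↔ ((y ∈ o) ↔ cs.count y % 2 = 0) := by
  induction cs with
  | nil => intro o y; simp
  | cons c cs ih =>
    intro o y
    rw [List.foldl_cons, ih, mem_pvToggle]
    by_cases hyc : y = c
    · subst hyc
      simp only [List.count_cons_self]
      by_cases ho : y ∈ o <;> simp [ho] <;> omega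
    · have hcy : ¬ c = y := fun h => hyc h.symm
      simp [hyc, hcy]

theorem nodup_foldl_pvToggle (cs : List Char) : ∀ (o : PySem.Set Char),
    o.Nodup → (cs.foldl pvToggle o).Nodup := by
  induction cs with
  | nil => intro o h; simpa using h
  | cons c cs ih => intro o h; exact ih _ (nodup_pvToggle o c h)

theorem mem_oddSet (cs : List Char) (y : Char) :
    y ∈ cs.foldl pvToggle PySem.Set.empty ↔ cs.count y % 2 = 1 := by
  rw [mem_foldl_pvToggle]
  simp [PySem.Set.empty]

theorem oddSet_subset (cs : List Char) :
    cs.foldl pvToggle PySem.Set.empty ⊆ PySem.Set.ofList cs := by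
  intro y hy
  rw [mem_oddSet] at hy
  rw [PySem.Set.mem_ofList]
  have : cs.count y ≠ 0 := by omega
  exact List.count_pos_iff.mp (Nat.pos_of_ne_zero this)

theorem check_string_parity_values (cs : List Char) :
    (cs.foldl (fun d char => d.insert char (d.getD char 0 + 1)) PySem.Dict.empty).values
      = (PySem.Set.ofList cs).map (fun k => ((cs.count k : Nat) : Int)) := by
  have h : cs.foldl (fun d char => d.insert char (d.getD char 0 + 1)) PySem.Dict.empty
      = PySem.Dict.counter cs := rfl
  rw [h]
  show (PySem.Dict.counter cs).items.map (·.2) = _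
  rw [PySem.Dict.items_counter]
  simp

-- ===== VERDICT (by name: the statement is the Claim_ definition above) =====
theorem check_string_parity_spec : Claim_equal_check_string_parity := by
  intro s _
  unfold Spec_check_string_parity
  simp only [check_string_parity, check_string_parity_alt]
  rw [PySem.List.foldl_prod_mk]
  set cs := s.toList with hcs
  rw [check_string_parity_values]
  have hodd := mem_oddSet cs
  set odd := cs.foldl pvToggle PySem.Set.empty with hoddset
  have hdist : cs.foldl PySem.Set.add PySem.Set.empty = PySem.Set.ofList cs := rfl
  rw [hdist]
  have hsub : odd ⊆ PySem.Set.ofList cs := oddSet_subset cs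
  have hnodup_odd : odd.Nodup := nodup_foldl_pvToggle cs _ (by simp [PySem.Set.empty])
  have hnodup_dist : (PySem.Set.ofList cs).Nodup := PySem.Set.nodup_ofList cs
  by_cases h0 : odd = []
  · -- no char has odd count: A's first `all` is true, B's set is empty
    have hall : ∀ y ∈ cs, cs.count y % 2 = 0 := by
      intro y hy
      by_contra hne
      have : y ∈ odd := (hodd y).mpr (by omega)
      simp [h0] at this
    simp [h0]
    intro x hx hx1
    have := hall x hx
    omega
  · -- some char has odd count
    obtain ⟨w, hw⟩ := List.exists_mem_of_ne_nil odd h0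
    have hwodd : cs.count w % 2 = 1 := (hodd w).mp hw
    have hA1 : ((PySem.Set.ofList cs).map (fun k => ((cs.count k : Nat) : Int))).all
        (fun count => PySem.Int.mod count 2 == 0) = false := by
      simp only [List.all_map, List.all_eq_false, Function.comp]
      refine ⟨w, hsub hw, ?_⟩
      simp
      omega
    have hBnotempty : odd.isEmpty = false := by simp [h0]
    rw [hA1, hBnotempty]
    simp only [Bool.false_eq_true, if_false]
    -- remaining: A's all-odd test iff |odd| = |distinct|
    have hiff : (((PySem.Set.ofList cs).map (fun k => ((cs.count k : Nat) : Int))).all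
        (fun count => PySem.Int.mod count 2 == 1) = true)
        ↔ (PySem.Set.len odd == PySem.Set.len (PySem.Set.ofList cs)) = true := by
      constructor
      · intro h
        simp only [List.all_map, List.all_eq_true, Function.comp] at h
        have hsub2 : PySem.Set.ofList cs ⊆ odd := by
          intro y hy
          have := h y hy
          rw [PySem.Set.mem_ofList] at hy
          simp at this
          exact (hodd y).mpr (by omega)
        have hperm : odd.Perm (PySem.Set.ofList cs) :=
          (List.subperm_of_subset hnodup_odd hsub).antisymm
            (List.subperm_of_subset hnodup_dist hsub2)
        simp [PySem.Set.len, hperm.length_eq]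
      · intro h
        have hlen : odd.length = (PySem.Set.ofList cs).length := by
          simp [PySem.Set.len] at h; exact_mod_cast h
        have hperm : odd.Perm (PySem.Set.ofList cs) :=
          ((List.subperm_of_subset hnodup_odd hsub).perm_of_length_le (by omega))
        simp only [List.all_map, List.all_eq_true, Function.comp]
        intro k hk
        have hk' : k ∈ odd := hperm.mem_iff.mpr hk
        have := (hodd k).mp hk'
        simp
        omega
    by_cases h1 : ((PySem.Set.ofList cs).map (fun k => ((cs.count k : Nat) : Int))).all
        (fun count => PySem.Int.mod count 2 == 1) = true
    · rw [h1, hiff.mp h1]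
    · have h2 := hiff.not.mp h1
      simp only [Bool.not_eq_true] at h1 h2
      rw [h1, h2]
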